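-- pv_equiv track=rewrite | github.com/mchalek/euler | attempted/p152/p152.py | can_make_zero
-- ===== SOURCE A (Python) =====
-- def update_accessible(x, p, accessible):
--     assert(x < p)
--
--     new_accessible = {a: b for (a, b) in accessible.items()}
--     new_accessible.setdefault(x, 0)
--     new_accessible[x] += 1
--
--     for (value, count) in accessible.items():
--         w = (value + x) % p
--         new_accessible.setdefault(w, 0)
--         new_accessible[w] += count
--
--     return new_accessible
--
-- def can_make_zero(counts):
--     p = len(counts)
--     accessible = {}
--
--     for (k, count) in enumerate(counts):
--         if not k or not count:
--             continue
--
--         for z in range(count):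
--             accessible = update_accessible(k, p, accessible)
--
--     return 0 in accessible
-- ===== SOURCE B (Python) =====
-- def can_make_zero(counts):
--     p = len(counts)
--     reach = set()  # residues reachable as a nonempty selection sum mod p
--     for k in range(1, p):
--         c = counts[k]
--         if c <= 0:
--             continue
--         # all sums contributed by value k alone: j*k mod p for 1 <= j <= c,
--         # which repeats with period p, so j can be capped at min(c, p)
--         mults = {(j * k) % p for j in range(1, min(c, p) + 1)}
--         reach = reach | mults | {(a + m) % p for a in reach for m in mults}
--     return 0 in reach
-- ===== Notes on version B (the rewrite author's own statement) =====
-- stated objective: faster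
-- what changed: Replaces A's per-copy dict relaxation (one reachable-sums update for every single copy of every value) by a staged sumset construction: for each value k the residues j*k mod p it can contribute are produced directly for j up to min(count,p) (j*k mod p is periodic in j with period p), and the reachable set is extended by ONE Minkowski-sum pass per value, so the inner per-copy loop disappears and the work no longer depends on the magnitudes of the counts.
import Mathlib
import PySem

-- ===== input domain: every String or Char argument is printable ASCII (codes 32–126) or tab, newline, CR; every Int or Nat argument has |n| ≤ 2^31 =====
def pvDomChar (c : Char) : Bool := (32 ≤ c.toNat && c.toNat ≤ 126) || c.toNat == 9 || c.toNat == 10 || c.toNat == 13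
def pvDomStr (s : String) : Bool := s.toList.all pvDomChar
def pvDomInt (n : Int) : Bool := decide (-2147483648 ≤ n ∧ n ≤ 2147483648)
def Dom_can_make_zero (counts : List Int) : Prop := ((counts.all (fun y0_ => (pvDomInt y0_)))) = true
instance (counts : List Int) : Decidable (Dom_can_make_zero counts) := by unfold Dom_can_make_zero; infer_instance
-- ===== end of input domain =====

-- B replaces A's per-copy dict relaxation by one sumset pass per value, with the per-value
-- contributions j*k mod p generated directly for j ≤ min(count, p); objective: faster.


-- ===== PORT A =====
-- 'd.setdefault(w, 0); d[w] += c' — the bump pattern update_accessible performs twice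
def bumpAt (w : Int) (c : Int) (na : PySem.Dict Int Int) : PySem.Dict Int Int :=
  let na' := na.setdefault w 0
  na'.insert w (na'.getD w 0 + c)

-- the dict-comprehension copy of `accessible` is the dict itself (Lean values are immutable);
-- the assert(x < p) always holds on A's calls (x = k < len(counts)) and raises nowhere.
def update_accessible (x p : Int) (accessible : PySem.Dict Int Int) : PySem.Dict Int Int :=
  let new_accessible := bumpAt x 1 accessible
  accessible.items.foldl
    (fun na vc => bumpAt (PySem.Int.mod (vc.1 + x) p) vc.2 na) new_accessible

-- one step of A's outer loop body (the `continue` guard and the range(count) loop)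
def aElem (p : Int) (acc : PySem.Dict Int Int) (kc : Int × Int) : PySem.Dict Int Int :=
  if kc.1 == 0 || kc.2 == 0 then acc
  else (PySem.List.pyRange 0 kc.2 1).foldl (fun a _ => update_accessible kc.1 p a) acc

-- Python's enumerate(counts) as the list of (index, value) pairs
def pvEnum (xs : List Int) : List (Int × Int) :=
  (List.range xs.length).map (fun (i : Nat) => ((i : Int), xs.getD i 0))

def can_make_zero (counts : List Int) : Bool :=
  let p : Int := counts.length
  let accessible := (pvEnum counts).foldl (aElem p) PySem.Dict.empty
  accessible.contains 0

-- ===== PORT B =====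
-- the set comprehension {(j*k) % p for j in range(1, min(c, p)+1)}
def bMults (k p c : Int) : PySem.Set Int :=
  PySem.Set.ofList ((PySem.List.pyRange 1 (min c p + 1) 1).map (fun j => PySem.Int.mod (j * k) p))

-- one step of B's outer loop body; counts[k] for 1 ≤ k < len(counts) never raises, pyGetD is exact
def bElem (counts : List Int) (p : Int) (reach : PySem.Set Int) (k : Int) : PySem.Set Int :=
  let c := PySem.List.pyGetD counts k 0
  if decide (c ≤ 0) then reach
  else
    let mults := bMults k p c
    PySem.Set.union (PySem.Set.union reach mults)
      (PySem.Set.ofList (reach.flatMap (fun a => mults.map (fun m => PySem.Int.mod (a + m) p))))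

def can_make_zero_alt (counts : List Int) : Bool :=
  let p : Int := counts.length
  let reach := (PySem.List.pyRange 1 p 1).foldl (bElem counts p) PySem.Set.empty
  PySem.Set.contains reach 0

-- ===== PRECONDITION & SPEC =====
def Spec_can_make_zero (counts : List Int) (out : Bool) : Prop := out = can_make_zero_alt counts
instance (counts : List Int) (out : Bool) : Decidable (Spec_can_make_zero counts out) := by unfold Spec_can_make_zero; infer_instance

-- ===== CLAIM (what is proved, stated in full; the proofs are below) =====
def Claim_equal_can_make_zero : Prop := ∀ (counts : List Int), Dom_can_make_zero counts → Spec_can_make_zero counts (can_make_zero counts)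

-- ===== LEMMAS AND PROOFS =====

-- the invariant tying A's dict to B's set: same membership
def InvKS (d : PySem.Dict Int Int) (s : PySem.Set Int) : Prop :=
  ∀ w : Int, d.contains w = true ↔ w ∈ s

lemma pv_contains_bumpAt (w c u : Int) (na : PySem.Dict Int Int) :
    (bumpAt w c na).contains u = (u == w || na.contains u) := by
  simp [bumpAt, PySem.Dict.contains_insert, PySem.Dict.contains_setdefault]

lemma pv_contains_foldl_bump (x p : Int) (l : List (Int × Int)) :
    ∀ (na : PySem.Dict Int Int) (w : Int),
      ((l.foldl (fun na vc => bumpAt (PySem.Int.mod (vc.1 + x) p) vc.2 na) na).contains w)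
        = (na.contains w || l.any (fun vc => w == PySem.Int.mod (vc.1 + x) p)) := by
  induction l with
  | nil => simp
  | cons a t ih =>
    intro na w
    simp only [List.foldl_cons, List.any_cons, ih, pv_contains_bumpAt]
    cases h1 : na.contains w <;> cases h2 : (w == PySem.Int.mod (a.1 + x) p) <;> simp_all

lemma pv_update_contains (x p : Int) (d : PySem.Dict Int Int) (w : Int) :
    (update_accessible x p d).contains w
      = (w == x || d.contains w || d.keys.any (fun v => w == PySem.Int.mod (v + x) p)) := by
  show ((d.items.foldl (fun na vc => bumpAt (PySem.Int.mod (vc.1 + x) p) vc.2 na) (bumpAt x 1 d)).contains w) = _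
  rw [pv_contains_foldl_bump, pv_contains_bumpAt]
  have : d.keys.any (fun v => w == PySem.Int.mod (v + x) p)
      = d.items.any (fun vc => w == PySem.Int.mod (vc.1 + x) p) := by
    simp only [PySem.Dict.keys, List.any_map]; rfl
  rw [this]

-- prop version of one update step (p > 0)

lemma pv_foldl_const_iterate {α β : Type} (l : List α) (f : β → β) (b : β) :
    l.foldl (fun x _ => f x) b = f^[l.length] b := by
  induction l generalizing b with
  | nil => rfl
  | cons a t ih => simp [List.foldl_cons, ih, Function.iterate_succ_apply]

lemma pv_update_contains' (x p : Int) (hp : 0 < p) (d : PySem.Dict Int Int) (w : Int) :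
    (update_accessible x p d).contains w = true ↔
      (w = x ∨ d.contains w = true ∨ ∃ v, d.contains v = true ∧ w = (v + x) % p) := by
  rw [pv_update_contains]
  simp only [Bool.or_eq_true, beq_iff_eq, List.any_eq_true]
  constructor
  · rintro ((h | h) | ⟨v, hv, he⟩)
    · exact Or.inl h
    · exact Or.inr (Or.inl h)
    · refine Or.inr (Or.inr ⟨v, (PySem.Dict.contains_iff_mem_keys d v).mpr hv, ?_⟩)
      rw [PySem.Int.mod_eq_emod_of_pos hp] at he; simpa using he
  · rintro (h | h | ⟨v, hv, he⟩)
    · exact Or.inl (Or.inl h)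
    · exact Or.inl (Or.inr h)
    · refine Or.inr ⟨v, (PySem.Dict.contains_iff_mem_keys d v).mp hv, ?_⟩
      rw [PySem.Int.mod_eq_emod_of_pos hp]; simpa using he

lemma pv_emod_addl (N a x : Int) : (a % N + x) % N = (a + x) % N := by
  conv_lhs => rw [Int.add_emod, Int.emod_emod_of_dvd a dvd_rfl, ← Int.add_emod]

lemma pv_iter_contains (x p : Int) (hx1 : 1 ≤ x) (hxp : x < p) (d : PySem.Dict Int Int)
    (m : Nat) (w : Int) :
    ((update_accessible x p)^[m] d).contains w = true ↔
      (d.contains w = true ∨ ∃ j : Nat, 1 ≤ j ∧ j ≤ m ∧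
        (w = ((j : Int) * x) % p ∨ ∃ v, d.contains v = true ∧ w = (v + (j : Int) * x) % p)) := by
  have hp : 0 < p := by omega
  induction m generalizing w with
  | zero => simp
  | succ m ih =>
    rw [Function.iterate_succ_apply', pv_update_contains' x p hp]
    constructor
    · rintro (rfl | h | ⟨v, hv, rfl⟩)
      · refine Or.inr ⟨1, le_rfl, by omega, Or.inl ?_⟩
        rw [Int.emod_eq_of_lt (by omega) (by omega)]; ring
      · rcases (ih w).mp h with h | ⟨j, h1, h2, h3⟩
        · exact Or.inl h
        · exact Or.inr ⟨j, h1, by omega, h3⟩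
      · rcases (ih v).mp hv with h | ⟨j, h1, h2, h3⟩
        · refine Or.inr ⟨1, le_rfl, by omega, Or.inr ⟨v, h, ?_⟩⟩
          push_cast; ring_nf
        · rcases h3 with rfl | ⟨u, hu, rfl⟩
          · refine Or.inr ⟨j + 1, by omega, by omega, Or.inl ?_⟩
            rw [pv_emod_addl]; push_cast; ring_nf
          · refine Or.inr ⟨j + 1, by omega, by omega, Or.inr ⟨u, hu, ?_⟩⟩
            rw [pv_emod_addl]; push_cast; ring_nf
    · rintro (h | ⟨j, h1, h2, h3⟩)
      · exact Or.inr (Or.inl ((ih w).mpr (Or.inl h)))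
      · rcases Nat.lt_or_ge j (m + 1) with hjm | hjm
        · exact Or.inr (Or.inl ((ih w).mpr (Or.inr ⟨j, h1, by omega, h3⟩)))
        · -- j = m + 1
          have hj : j = m + 1 := by omega
          subst hj
          rcases h3 with rfl | ⟨v, hv, rfl⟩
          · cases m with
            | zero =>
              refine Or.inl ?_
              rw [Int.emod_eq_of_lt (by omega) (by omega)]; push_cast; ring_nf
            | succ m' =>
              refine Or.inr (Or.inr ⟨(((m' + 1 : Nat) : Int) * x) % p, ?_, ?_⟩)
              · exact (ih _).mpr (Or.inr ⟨m' + 1, by omega, le_rfl, Or.inl rfl⟩)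
              · rw [pv_emod_addl]; push_cast; ring_nf
          · cases m with
            | zero =>
              refine Or.inr (Or.inr ⟨v, (ih v).mpr (Or.inl hv), ?_⟩)
              push_cast; ring_nf
            | succ m' =>
              refine Or.inr (Or.inr ⟨(v + ((m' + 1 : Nat) : Int) * x) % p, ?_, ?_⟩)
              · exact (ih _).mpr (Or.inr ⟨m' + 1, by omega, le_rfl, Or.inr ⟨v, hv, rfl⟩⟩)
              · rw [pv_emod_addl]; push_cast; ring_nf

lemma pv_mem_bMults (k p c : Int) (w : Int) :
    w ∈ bMults k p c ↔ ∃ j : Int, 1 ≤ j ∧ j ≤ min c p ∧ w = PySem.Int.mod (j * k) p := by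
  simp only [bMults, PySem.Set.mem_ofList, List.mem_map, PySem.List.mem_pyRange_one]
  constructor
  · rintro ⟨j, ⟨h1, h2⟩, rfl⟩; exact ⟨j, h1, by omega, rfl⟩
  · rintro ⟨j, h1, h2, rfl⟩; exact ⟨j, ⟨h1, by omega⟩, rfl⟩

lemma pv_cap (k p c : Int) (hp : 0 < p) (j : Nat) (hj1 : 1 ≤ j) (hjc : (j : Int) ≤ c) :
    ∃ j' : Int, 1 ≤ j' ∧ j' ≤ min c p ∧ (j' * k) % p = ((j : Int) * k) % p := by
  have hne : p ≠ 0 := by omega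
  refine ⟨((j : Int) - 1) % p + 1, ?_, ?_, ?_⟩
  · have := Int.emod_nonneg ((j:Int)-1) hne; omega
  · have h1 := Int.emod_lt_of_pos ((j:Int)-1) hp
    have h2 := Int.emod_nonneg ((j:Int)-1) hne
    rcases le_or_gt p c with h | h
    · omega
    · have : ((j:Int)-1) % p = (j:Int)-1 := Int.emod_eq_of_lt (by omega) (by omega)
      omega
  · have h1 : ((j:Int) - 1) % p + 1 ≡ (j : Int) [ZMOD p] := by
      have h0 : ((j:Int) - 1) % p ≡ (j:Int) - 1 [ZMOD p] := Int.emod_emod_of_dvd _ dvd_rfl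
      simpa using Int.ModEq.add_right 1 h0
    exact h1.mul_right k

lemma pv_emod_addr (N a x : Int) : (a + x % N) % N = (a + x) % N := by
  conv_lhs => rw [Int.add_emod, Int.emod_emod_of_dvd x dvd_rfl, ← Int.add_emod]

lemma pv_step (counts : List Int) (d : PySem.Dict Int Int) (s : PySem.Set Int)
    (h : InvKS d s) (k : Int) (hk1 : 1 ≤ k) (hkp : k < (counts.length : Int)) :
    InvKS (aElem (counts.length : Int) d (k, PySem.List.pyGetD counts k 0))
          (bElem counts (counts.length : Int) s k) := by
  have hp : 0 < (counts.length : Int) := by omega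
  simp only [aElem, bElem]
  set p : Int := (counts.length : Int) with hpdef
  set c : Int := PySem.List.pyGetD counts k 0 with hcdef
  have hk0 : (k == (0:Int)) = false := by simp; omega
  rw [hk0, Bool.false_or]
  split_ifs with h1 h2 h2
  · exact h
  · exfalso; simp at h1 h2; omega
  · have hnil : PySem.List.pyRange 0 c 1 = [] := by
      rw [PySem.List.pyRange_one]
      have hz : (c - 0).toNat = 0 := by simp at h2; omega
      rw [hz]; simp
    rw [hnil]; exact h
  · have hc : 1 ≤ c := by simp at h1 h2; omega
    rw [pv_foldl_const_iterate, PySem.List.length_pyRange_one]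
    intro w
    rw [pv_iter_contains k p hk1 hkp d _ w]
    simp only [PySem.Set.mem_union, pv_mem_bMults, PySem.Set.mem_ofList, List.mem_flatMap,
      List.mem_map]
    constructor
    · rintro (hd | ⟨j, hj1, hjm, rfl | ⟨v, hv, rfl⟩⟩)
      · exact Or.inl (Or.inl ((h w).mp hd))
      · obtain ⟨j', ha1, ha2, ha3⟩ := pv_cap k p c hp j hj1 (by omega)
        exact Or.inl (Or.inr ⟨j', ha1, ha2, by rw [PySem.Int.mod_eq_emod_of_pos hp, ha3]⟩)
      · obtain ⟨j', ha1, ha2, ha3⟩ := pv_cap k p c hp j hj1 (by omega)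
        refine Or.inr ⟨v, (h v).mp hv, PySem.Int.mod (j' * k) p, ⟨j', ha1, ha2, rfl⟩, ?_⟩
        rw [PySem.Int.mod_eq_emod_of_pos hp, PySem.Int.mod_eq_emod_of_pos hp,
            pv_emod_addr, ← pv_emod_addr p v (j' * k), ha3, pv_emod_addr]
    · rintro ((hs | ⟨j, hj1, hjm, rfl⟩) | ⟨a, ha, _, ⟨j, hj1, hjm, rfl⟩, rfl⟩)
      · exact Or.inl ((h w).mpr hs)
      · refine Or.inr ⟨j.toNat, by omega, by omega, Or.inl ?_⟩
        have hj : (j.toNat : Int) = j := by omega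
        rw [PySem.Int.mod_eq_emod_of_pos hp, hj]
      · refine Or.inr ⟨j.toNat, by omega, by omega, Or.inr ⟨a, (h a).mpr ha, ?_⟩⟩
        have hj : (j.toNat : Int) = j := by omega
        rw [PySem.Int.mod_eq_emod_of_pos hp, PySem.Int.mod_eq_emod_of_pos hp, pv_emod_addr, hj]

lemma pv_enum_fold (counts : List Int) (h : counts ≠ []) :
    (pvEnum counts).foldl (aElem (counts.length : Int)) PySem.Dict.empty
      = (PySem.List.pyRange 1 (counts.length : Int) 1).foldl
          (fun d k => aElem (counts.length : Int) d (k, PySem.List.pyGetD counts k 0))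
          PySem.Dict.empty := by
  obtain ⟨n, hn⟩ : ∃ n, counts.length = n + 1 :=
    ⟨counts.length - 1, by cases counts <;> simp_all⟩
  rw [pvEnum, List.foldl_map, hn, List.range_succ_eq_map, List.foldl_cons]
  have h0 : aElem (((n + 1 : Nat) : Int)) PySem.Dict.empty (((0:Nat) : Int), counts.getD 0 0)
      = PySem.Dict.empty := by simp [aElem]
  rw [h0, List.foldl_map, PySem.List.pyRange_one, List.foldl_map]
  have hlen : ((((n + 1 : Nat) : Int)) - 1).toNat = n := by omega
  rw [hlen]
  congr 1
  funext d y
  have h1 : ((Nat.succ y : Nat) : Int) = 1 + (y : Int) := by push_cast; ring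
  have h2 : PySem.List.pyGetD counts (1 + (y : Int)) 0 = counts.getD (Nat.succ y) 0 := by
    rw [← h1, PySem.List.pyGetD_natCast]
  rw [h1, h2]

lemma pv_fold (counts : List Int) :
    ∀ (l : List Int), (∀ k ∈ l, 1 ≤ k ∧ k < (counts.length : Int)) →
    ∀ (d : PySem.Dict Int Int) (s : PySem.Set Int), InvKS d s →
      InvKS (l.foldl (fun d k => aElem (counts.length : Int) d (k, PySem.List.pyGetD counts k 0)) d)
            (l.foldl (bElem counts (counts.length : Int)) s) := by
  intro l
  induction l with
  | nil => intro _ d s h; exact h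
  | cons a t ih =>
    intro hl d s h
    simp only [List.foldl_cons]
    exact ih (fun k hk => hl k (List.mem_cons_of_mem a hk)) _ _
      (pv_step counts d s h a (hl a List.mem_cons_self).1 (hl a List.mem_cons_self).2)

-- ===== VERDICT (by name: the statement is the Claim_ definition above) =====
theorem can_make_zero_spec : Claim_equal_can_make_zero := by
  intro counts _
  unfold Spec_can_make_zero
  cases hc : counts with
  | nil => subst hc; decide
  | cons a t =>
    rw [← hc]
    have hne : counts ≠ [] := by rw [hc]; simp
    simp only [can_make_zero, can_make_zero_alt]
    rw [pv_enum_fold counts hne]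
    have hinv := pv_fold counts (PySem.List.pyRange 1 (counts.length : Int) 1)
      (fun k hk => by
        have := PySem.List.mem_pyRange_one.mp hk
        exact ⟨this.1, this.2⟩)
      PySem.Dict.empty PySem.Set.empty
      (fun w => by simp [PySem.Dict.contains_empty, PySem.Set.empty])
    have h0 := hinv 0
    rw [Bool.eq_iff_iff]
    exact h0.trans (PySem.Set.contains_iff _ _).symm
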